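-- pv_equiv track=rewrite | github.com/Glasteriano/IPV4-Calculator | ipv4_class.py | _separar_ip_binario
-- ===== SOURCE A (Python) =====
-- def _separar_ip_binario(local) -> list:
--     final = []
--     auxiliar = []
--     for _, y in local:
--         auxiliar.append(y)
--
--         if len(auxiliar) == 8:
--             final.append(auxiliar)
--             auxiliar = []
--     return final
-- ===== SOURCE B (Python) =====
-- def _separar_ip_binario(local) -> list:
--     ys = [y for _, y in local]
--     return [ys[i:i + 8] for i in range(0, len(ys) - len(ys) % 8, 8)]
-- ===== Notes on version B (the rewrite author's own statement) =====
-- stated objective: simpler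
-- what changed: Replaces A's single-pass accumulate-and-flush buffer with a two-phase materialize-then-slice: extract all second components, then emit complete 8-element chunks by strided slicing.
import Mathlib
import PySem

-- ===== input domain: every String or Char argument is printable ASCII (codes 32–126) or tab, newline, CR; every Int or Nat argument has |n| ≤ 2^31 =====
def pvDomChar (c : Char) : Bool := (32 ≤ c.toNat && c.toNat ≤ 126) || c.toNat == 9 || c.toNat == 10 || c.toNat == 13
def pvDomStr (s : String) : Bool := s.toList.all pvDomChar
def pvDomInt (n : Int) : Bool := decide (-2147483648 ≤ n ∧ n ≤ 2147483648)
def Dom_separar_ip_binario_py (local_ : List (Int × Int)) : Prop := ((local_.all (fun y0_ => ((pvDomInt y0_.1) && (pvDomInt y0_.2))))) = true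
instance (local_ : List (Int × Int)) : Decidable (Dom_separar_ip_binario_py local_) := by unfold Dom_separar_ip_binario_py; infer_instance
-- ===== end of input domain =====

-- B replaces A's accumulate-and-flush buffer loop with materialize-then-slice (simpler decomposition).

-- ===== PORT A =====
-- for _, y in local: append y to auxiliar; flush auxiliar into final when it reaches length 8
def pvStepA (st : List (List Int) × List Int) (p : Int × Int) : List (List Int) × List Int :=
  let auxiliar := st.2 ++ [p.2]
  if auxiliar.length = 8 then (st.1 ++ [auxiliar], ([] : List Int)) else (st.1, auxiliar)

def separar_ip_binario_py (local_ : List (Int × Int)) : List (List Int) :=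
  (local_.foldl pvStepA (([] : List (List Int)), ([] : List Int))).1

-- ===== PORT B =====
-- ys = [y for _, y in local]; [ys[i:i+8] for i in range(0, len(ys) - len(ys) % 8, 8)]
def separar_ip_binario_py_alt (local_ : List (Int × Int)) : List (List Int) :=
  let ys : List Int := local_.map (fun p => p.2)
  (PySem.List.pyRange 0 ((ys.length : Int) - PySem.Int.mod (ys.length : Int) 8) 8).map
    (fun i => PySem.List.slice ys (some i) (some (i + 8)))

-- ===== PRECONDITION & SPEC =====
def Spec_separar_ip_binario_py (local_ : List (Int × Int)) (out : List (List Int)) : Prop := out = separar_ip_binario_py_alt local_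
instance (local_ : List (Int × Int)) (out : List (List Int)) : Decidable (Spec_separar_ip_binario_py local_ out) := by unfold Spec_separar_ip_binario_py; infer_instance

-- ===== CLAIM (what is proved, stated in full; the proofs are below) =====
def Claim_equal_separar_ip_binario_py : Prop := ∀ (local_ : List (Int × Int)), Dom_separar_ip_binario_py local_ → Spec_separar_ip_binario_py local_ (separar_ip_binario_py local_)

-- ===== LEMMAS AND PROOFS =====

-- common characterisation: the j-th complete 8-chunk of ys, for j < ys.length / 8
def pvChunks (ys : List Int) : List (List Int) :=
  (List.range (ys.length / 8)).map (fun j => (ys.drop (8 * j)).take 8)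

-- A's loop, with partial buffer aux (|aux| < 8), produces acc ++ the chunks of aux ++ remaining values
theorem loopA_eq (loc : List (Int × Int)) : ∀ (acc : List (List Int)) (aux : List Int),
    aux.length < 8 →
    (loc.foldl pvStepA (acc, aux)).1 = acc ++ pvChunks (aux ++ loc.map (fun p => p.2)) := by
  induction loc with
  | nil =>
      intro acc aux h
      simp [pvChunks, Nat.div_eq_of_lt, h]
  | cons p tl ih =>
      intro acc aux h
      by_cases h8 : aux.length + 1 = 8
      · have hstep : pvStepA (acc, aux) p = (acc ++ [aux ++ [p.2]], ([] : List Int)) := by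
          simp [pvStepA, h8]
        rw [List.foldl_cons, hstep, ih (acc ++ [aux ++ [p.2]]) [] (by norm_num)]
        have hlen : (aux ++ [p.2]).length = 8 := by simp [h8]
        have : pvChunks (aux ++ p.2 :: tl.map (fun p => p.2))
            = (aux ++ [p.2]) :: pvChunks (tl.map (fun p => p.2)) := by
          have hsplit : aux ++ p.2 :: tl.map (fun p => p.2)
              = (aux ++ [p.2]) ++ tl.map (fun p => p.2) := by simp
          rw [hsplit]
          unfold pvChunks
          rw [List.length_append, hlen]
          have hq : (8 + (tl.map (fun p => p.2)).length) / 8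
              = (tl.map (fun p => p.2)).length / 8 + 1 := by omega
          rw [hq, List.range_succ_eq_map]
          simp only [List.map_cons, List.map_map]
          refine List.cons_eq_cons.mpr ⟨?_, ?_⟩
          · rw [Nat.mul_zero, List.drop_zero,
              List.take_append_of_le_length (le_of_eq hlen.symm),
              List.take_of_length_le (le_of_eq hlen)]
          · refine List.map_congr_left ?_
            intro j _
            simp only [Function.comp_apply]
            rw [List.drop_append, List.drop_eq_nil_of_le (by rw [hlen]; omega),
              List.nil_append, hlen]
            have hidx : 8 * Nat.succ j - 8 = 8 * j := by omega
            rw [hidx]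
        simp only [List.map_cons] at *
        rw [this]
        simp
      · have hstep : pvStepA (acc, aux) p = (acc, aux ++ [p.2]) := by
          simp [pvStepA, h8]
        rw [List.foldl_cons, hstep, ih acc (aux ++ [p.2]) (by simp; omega)]
        simp

-- B evaluates to pvChunks of the extracted values
theorem altB_eq (loc : List (Int × Int)) :
    separar_ip_binario_py_alt loc = pvChunks (loc.map (fun p => p.2)) := by
  unfold separar_ip_binario_py_alt pvChunks
  dsimp only
  set ys : List Int := loc.map (fun p => p.2) with hys
  set q : Nat := ys.length / 8 with hq
  have hbound : ((ys.length : Int)) - PySem.Int.mod (ys.length : Int) 8 = ((8 * q : Nat) : Int) := by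
    simp only [PySem.Int.mod, Int.fmod_eq_emod]
    simp only [hq]
    omega
  rw [hbound, PySem.List.pyRange_of_pos 0 ((8 * q : Nat) : Int) (by norm_num)]
  have hcount : (if (0:Int) < ((8 * q : Nat) : Int)
      then (((((8 * q : Nat) : Int)) - 0 + 8 - 1) / 8).toNat else 0) = q := by
    split_ifs with hpos
    · omega
    · omega
  rw [hcount, List.map_map]
  refine List.map_congr_left ?_
  intro k _
  simp only [Function.comp_apply]
  have h1 : (0 : Int) + 8 * (k : Int) = ((8 * k : Nat) : Int) := by push_cast; ring
  have h2 : (0 : Int) + 8 * (k : Int) + 8 = ((8 * k : Nat) : Int) + ((8 : Nat) : Int) := by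
    push_cast; ring
  rw [h1]
  exact_mod_cast PySem.List.slice_natCast_add ys (8 * k) 8

-- ===== VERDICT (by name: the statement is the Claim_ definition above) =====
theorem separar_ip_binario_py_spec : Claim_equal_separar_ip_binario_py := by
  intro loc _
  unfold Spec_separar_ip_binario_py
  rw [altB_eq]
  unfold separar_ip_binario_py
  rw [loopA_eq loc [] [] (by norm_num)]
  simp
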